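-- pv_equiv track=rewrite | github.com/AsithaLKonara/J-tech-License-server | parsers/enhanced_binary_parser.py | _choose_matrix_dimensions
-- ===== SOURCE A (Python) =====
-- from typing import Optional, Tuple, List
--
-- def _choose_matrix_dimensions(led_count: int) -> Tuple[int, int]:
--     """Pick a friendly matrix width×height for a given LED count."""
--     preferred = [12, 16, 8, 10, 20, 24, 32]
--     for w in preferred:
--         if led_count % w == 0:
--             h = led_count // w
--             if h >= 1:
--                 return (w, h)
--     # closest to square with width>=height
--     best = (led_count, 1)
--     best_diff = led_count
--     import math
--     for h in range(1, int(math.sqrt(led_count)) + 1):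
--         if led_count % h == 0:
--             w = led_count // h
--             if w < h:
--                 w, h = h, w
--             diff = abs(w - h)
--             if diff < best_diff:
--                 best = (w, h)
--                 best_diff = diff
--     return best
-- ===== SOURCE B (Python) =====
-- import math
--
-- def _choose_matrix_dimensions(led_count):
--     """Pick a friendly matrix width×height for a given LED count."""
--     preferred = [12, 16, 8, 10, 20, 24, 32]
--     for w in preferred:
--         if led_count % w == 0:
--             h = led_count // w
--             if h >= 1:
--                 return (w, h)
--     # The largest divisor h <= sqrt(n) yields the closest-to-square pair
--     # with width >= height, so return at the first hit of a descending scan.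
--     for h in range(int(math.sqrt(led_count)), 0, -1):
--         if led_count % h == 0:
--             return (led_count // h, h)
--     return (led_count, 1)
-- ===== Notes on version B (the rewrite author's own statement) =====
-- stated objective: simpler
-- what changed: The closest-to-square fallback no longer scans h=1..sqrt(n) ascending while tracking a best/best_diff accumulator; it scans h downward from int(sqrt(n)) and returns immediately at the first divisor (the largest divisor <= sqrt(n)), eliminating the accumulator, the swap branch and the diff comparison entirely.
import Mathlib
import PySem

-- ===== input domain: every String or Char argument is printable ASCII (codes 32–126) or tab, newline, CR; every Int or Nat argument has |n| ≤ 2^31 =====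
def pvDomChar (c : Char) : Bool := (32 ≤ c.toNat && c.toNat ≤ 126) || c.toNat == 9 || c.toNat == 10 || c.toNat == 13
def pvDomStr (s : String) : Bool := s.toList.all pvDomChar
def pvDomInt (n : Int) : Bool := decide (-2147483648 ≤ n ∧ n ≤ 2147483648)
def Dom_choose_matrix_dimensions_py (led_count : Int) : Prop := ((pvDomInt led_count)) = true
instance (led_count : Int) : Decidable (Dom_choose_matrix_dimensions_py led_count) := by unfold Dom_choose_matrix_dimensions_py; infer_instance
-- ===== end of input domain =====

-- B replaces A's ascending best/best_diff-tracking divisor scan by a descending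
-- early-return scan for the largest divisor ≤ √n (objective: simpler).

-- ===== PORT A =====
-- the preferred-width loop (this loop is identical, line for line, in A and in B,
-- so both ports share this one helper)
def pvPreferredLoop (led_count : Int) : List Int → Option (Int × Int)
  | [] => none
  | w :: ws =>
    if PySem.Int.mod led_count w = 0 then
      let h := PySem.Int.floordiv led_count w
      if 1 ≤ h then some (w, h) else pvPreferredLoop led_count ws
    else pvPreferredLoop led_count ws

-- one iteration of A's best/best_diff loop body (state = (best, best_diff))
def pvStepA (n : Int) (st : (Int × Int) × Int) (h : Int) : (Int × Int) × Int :=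
  if PySem.Int.mod n h = 0 then
    let w := PySem.Int.floordiv n h
    let p := if w < h then (h, w) else (w, h)
    let diff := |p.1 - p.2|
    if diff < st.2 then (p, diff) else st
  else st

-- int(math.sqrt(led_count)) is ported as Nat.sqrt led_count.toNat: exact for
-- 0 ≤ led_count ≤ 2^31 (the float sqrt of such an int rounds within 1/(2√n))
def choose_matrix_dimensions_py (led_count : Int) : Int × Int :=
  match pvPreferredLoop led_count [12, 16, 8, 10, 20, 24, 32] with
  | some p => p
  | none =>
    let r : Int := (Nat.sqrt led_count.toNat : Int)
    ((PySem.List.pyRange 1 (r + 1) 1).foldl (pvStepA led_count) ((led_count, 1), led_count)).1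

-- ===== PORT B =====
-- B's 'for h in range(int(math.sqrt(n)), 0, -1): if n % h == 0: return (n//h, h)'
-- with early return, peeled as structural recursion on h (h, h-1, …, 1);
-- falling off the loop gives the default (n, 1)
def pvDescendB (n : Int) : Nat → Int × Int
  | 0 => (n, 1)
  | Nat.succ k =>
    if PySem.Int.mod n ((k + 1 : Nat) : Int) = 0 then
      (PySem.Int.floordiv n ((k + 1 : Nat) : Int), ((k + 1 : Nat) : Int))
    else pvDescendB n k

def choose_matrix_dimensions_py_alt (led_count : Int) : Int × Int :=
  match pvPreferredLoop led_count [12, 16, 8, 10, 20, 24, 32] with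
  | some p => p
  | none => pvDescendB led_count (Nat.sqrt led_count.toNat)

-- ===== PRECONDITION & SPEC =====
-- Pre_ excludes negative led_count, on which A (and B alike) raise ValueError in math.sqrt.
def Pre_choose_matrix_dimensions_py (led_count : Int) : Prop := 0 ≤ led_count
instance (led_count : Int) : Decidable (Pre_choose_matrix_dimensions_py led_count) := by unfold Pre_choose_matrix_dimensions_py; infer_instance
def pvWitness_choose_matrix_dimensions_py : Int := 30
def Spec_choose_matrix_dimensions_py (led_count : Int) (out : Int × Int) : Prop := out = choose_matrix_dimensions_py_alt led_count
instance (led_count : Int) (out : Int × Int) : Decidable (Spec_choose_matrix_dimensions_py led_count out) := by unfold Spec_choose_matrix_dimensions_py; infer_instance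

-- ===== CLAIM (what is proved, stated in full; the proofs are below) =====
def Claim_equal_choose_matrix_dimensions_py : Prop := ∀ (led_count : Int), Dom_choose_matrix_dimensions_py led_count → Pre_choose_matrix_dimensions_py led_count → Spec_choose_matrix_dimensions_py led_count (choose_matrix_dimensions_py led_count)

-- ===== LEMMAS AND PROOFS =====

-- A's loop body at a divisor s ≤ √n with current best_diff above n/s - s: best is updated
theorem pv_step_div (n : Int) (st : (Int × Int) × Int) (s : Int) (hs : 0 < s)
    (hdvd : s ∣ n) (hle : s ≤ n / s) (hlt : n / s - s < st.2) :
    pvStepA n st s = ((n / s, s), n / s - s) := by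
  have hm : PySem.Int.mod n s = 0 := (PySem.Int.mod_eq_zero_iff_dvd n s).mpr hdvd
  have hf : PySem.Int.floordiv n s = n / s := PySem.Int.floordiv_eq_ediv_of_pos hs
  have h1 : (if n / s < s then (s, n / s) else (n / s, s)) = (n / s, s) :=
    if_neg (by omega)
  simp only [pvStepA, hm, hf, h1]
  rw [abs_of_nonneg (by omega)]
  simp [hlt]

-- A's loop body at a non-divisor: state unchanged
theorem pv_step_ndiv (n : Int) (st : (Int × Int) × Int) (s : Int)
    (hm : ¬ PySem.Int.mod n s = 0) : pvStepA n st s = st := by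
  simp only [pvStepA, if_neg hm]

-- main loop lemma: for 1 ≤ r with r² ≤ n, A's ascending fold ends at
-- ((n/d, d), n/d - d) where (n/d, d) = pvDescendB n r (d = largest divisor of n in [1..r])
theorem pv_loop_eq (n : Int) (hn : 1 ≤ n) :
    ∀ r : Nat, 1 ≤ r → ((r : Int) * (r : Int) ≤ n) →
    ∃ d : Int, 1 ≤ d ∧ d ≤ (r : Int) ∧ n % d = 0 ∧
      pvDescendB n r = (n / d, d) ∧
      (PySem.List.pyRange 1 ((r : Int) + 1) 1).foldl (pvStepA n) ((n, 1), n)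
        = ((n / d, d), n / d - d) := by
  intro r hr
  induction r, hr using Nat.le_induction with
  | base =>
    intro _
    push_cast
    refine ⟨1, le_refl _, le_refl _, Int.emod_one n, ?_, ?_⟩
    · simp [pvDescendB, PySem.Int.mod, PySem.Int.floordiv]
    · have h12 : PySem.List.pyRange 1 2 1 = [1] := by
        have := PySem.List.pyRange_one_singleton (1:Int); norm_num at this; exact this
      have h1 : pvStepA n ((n, 1), n) 1 = ((n / 1, 1), n / 1 - 1) := by
        refine pv_step_div n _ 1 (by norm_num) (one_dvd n) ?_ ?_ <;>
          simp <;> omega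
      norm_num [h12, List.foldl, h1]
  | succ r hr ih =>
    intro hs2
    have hr2 : ((r : Int) * (r : Int) ≤ n) := by push_cast at hs2 ⊢; nlinarith
    obtain ⟨d, hd1, hdr, hdvd, hB, hA⟩ := ih hr2
    set s : Int := (r : Int) + 1 with hs
    have hspos : 0 < s := by positivity
    have hcast : (((r + 1 : Nat)) : Int) = s := by push_cast; ring
    have hsplit : PySem.List.pyRange 1 (((r+1:Nat) : Int) + 1) 1
        = PySem.List.pyRange 1 ((r : Int) + 1) 1 ++ [s] := by
      rw [hcast, PySem.List.pyRange_one_succ_right (by omega)]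
    by_cases hc : PySem.Int.mod n s = 0
    · -- s divides n: B's descending scan returns at s, A's fold updates best to s
      have hsdvd : s ∣ n := (PySem.Int.mod_eq_zero_iff_dvd n s).mp hc
      have hddvd : d ∣ n := Int.dvd_of_emod_eq_zero hdvd
      have hb : n / s * s = n := Int.ediv_mul_cancel hsdvd
      have ha : n / d * d = n := Int.ediv_mul_cancel hddvd
      have hs2' : s * s ≤ n := by push_cast at hs2; push_cast [hs]; nlinarith
      have hble : s ≤ n / s := by nlinarith
      have hage : n / s ≤ n / d := by
        have h1 : 0 ≤ n / d := by nlinarith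
        nlinarith
      refine ⟨s, by omega, by rw [hcast], (PySem.Int.mod_eq_emod_of_pos hspos) ▸ hc, ?_, ?_⟩
      · show pvDescendB n (r + 1) = _
        rw [pvDescendB, if_pos (by rwa [hcast]), hcast]
        rw [PySem.Int.floordiv_eq_ediv_of_pos hspos]
      · rw [hsplit, List.foldl_append, hA, List.foldl]
        exact List.foldl_nil ▸ pv_step_div n _ s hspos hsdvd hble (by omega)
    · -- s does not divide n: both sides fall through to [1..r] resp. [r..1]
      refine ⟨d, hd1, by rw [hcast]; omega, hdvd, ?_, ?_⟩
      · show pvDescendB n (r + 1) = _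
        rw [pvDescendB, if_neg (by rwa [hcast]), hB]
      · rw [hsplit, List.foldl_append, hA, List.foldl, pv_step_ndiv n _ s hc, List.foldl]

theorem choose_eq (n : Int) (h0 : 0 ≤ n) :
    choose_matrix_dimensions_py n = choose_matrix_dimensions_py_alt n := by
  rcases eq_or_lt_of_le h0 with h | hpos
  · subst n; decide
  · unfold choose_matrix_dimensions_py choose_matrix_dimensions_py_alt
    cases hp : pvPreferredLoop n [12, 16, 8, 10, 20, 24, 32] with
    | some p => rfl
    | none =>
      show ((PySem.List.pyRange 1 ((Nat.sqrt n.toNat : Int) + 1) 1).foldl (pvStepA n) ((n, 1), n)).1 = pvDescendB n (Nat.sqrt n.toNat)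
      set r : Nat := Nat.sqrt n.toNat with hrdef
      have hr1 : 1 ≤ r := by
        rw [hrdef]
        exact Nat.sqrt_pos.mpr (by omega)
      have hrr : ((r : Int) * (r : Int) ≤ n) := by
        have h : r * r ≤ n.toNat := by
          rw [hrdef]; have := Nat.sqrt_le' n.toNat; nlinarith [this]
        have h3 : ((r * r : Nat) : Int) ≤ ((n.toNat : Nat) : Int) := by exact_mod_cast h
        rw [Int.toNat_of_nonneg h0] at h3
        push_cast at h3
        exact h3
      obtain ⟨d, _, _, _, hB, hA⟩ := pv_loop_eq n (by omega) r hr1 hrr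
      rw [hA, hB]

-- ===== VERDICT (by name: the statement is the Claim_ definition above) =====
theorem choose_matrix_dimensions_py_spec : Claim_equal_choose_matrix_dimensions_py := by
  intro n _ hpre
  exact choose_eq n hpre
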